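-- pv_equiv track=rewrite | github.com/ccctw-ma/leetcode | src/Match/match331-340/338.py | minOperations
-- ===== SOURCE A (Python) =====
-- from typing import List, Tuple, Union, Optional
-- from itertools import accumulate, permutations, combinations, product, compress, zip_longest, pairwise, groupby
-- from bisect import bisect_left, bisect_right, insort, insort_left, insort_right
--
-- def minOperations(nums: List[int], queries: List[int]) -> List[int]:
--     nums.sort()
--     preSums = [0] + list(accumulate(nums))
--     n = len(nums)
--     res = []
--     for q in queries:
--         idx = bisect_right(nums, q)
--         left = q * idx - preSums[idx]
--         right = preSums[-1] - preSums[idx] - q * (n - idx)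
--         res.append(left + right)
--     return res
-- ===== SOURCE B (Python) =====
-- from typing import List
--
-- def minOperations(nums: List[int], queries: List[int]) -> List[int]:
--     return [sum(abs(x - q) for x in nums) for q in queries]
-- ===== Notes on version B (the rewrite author's own statement) =====
-- stated objective: simpler
-- what changed: Replaces sort + prefix-sum array + per-query binary search with a direct one-line sum of absolute differences per query (no sorting, no auxiliary array); note A sorts nums in place while B leaves it untouched.
import Mathlib
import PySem

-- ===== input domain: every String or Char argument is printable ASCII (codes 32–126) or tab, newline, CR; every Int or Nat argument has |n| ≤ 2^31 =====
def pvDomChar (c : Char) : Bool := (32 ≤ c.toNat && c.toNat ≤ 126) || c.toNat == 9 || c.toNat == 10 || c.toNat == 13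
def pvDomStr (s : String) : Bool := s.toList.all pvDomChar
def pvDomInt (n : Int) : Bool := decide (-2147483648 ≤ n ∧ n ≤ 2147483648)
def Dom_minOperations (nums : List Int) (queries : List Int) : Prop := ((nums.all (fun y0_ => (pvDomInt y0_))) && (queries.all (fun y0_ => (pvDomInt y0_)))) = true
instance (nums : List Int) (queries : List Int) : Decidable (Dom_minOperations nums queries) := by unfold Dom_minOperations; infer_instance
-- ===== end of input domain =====

-- B replaces sort + prefix sums + per-query binary search by a direct per-query sum of
-- absolute differences (simpler, not faster); return-value equivalence only: A sorts nums
-- in place, B does not mutate its arguments.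

-- ===== PORT A =====
-- list(accumulate(nums)): the running partial sums
def pvAccAux (acc : Int) : List Int → List Int
  | [] => []
  | x :: xs => (acc + x) :: pvAccAux (acc + x) xs

def minOperations (nums : List Int) (queries : List Int) : List Int :=
  let s := PySem.List.sorted nums (fun x => x) false
  let preSums := 0 :: pvAccAux 0 s
  let n : Int := s.length
  queries.foldl (fun res q =>
    let idx : Int := (PySem.List.bisectRight s q : Int)
    let left := q * idx - PySem.List.pyGetD preSums idx 0
    let right := PySem.List.pyGetD preSums (-1) 0 - PySem.List.pyGetD preSums idx 0 - q * (n - idx)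
    res ++ [left + right]) []

-- ===== PORT B =====
def minOperations_alt (nums : List Int) (queries : List Int) : List Int :=
  queries.map (fun q => (nums.map (fun x => |x - q|)).sum)

-- ===== PRECONDITION & SPEC =====
def Spec_minOperations (nums : List Int) (queries : List Int) (out : List Int) : Prop := out = minOperations_alt nums queries
instance (nums : List Int) (queries : List Int) (out : List Int) : Decidable (Spec_minOperations nums queries out) := by unfold Spec_minOperations; infer_instance

-- ===== CLAIM (what is proved, stated in full; the proofs are below) =====
def Claim_equal_minOperations : Prop := ∀ (nums : List Int) (queries : List Int), Dom_minOperations nums queries → Spec_minOperations nums queries (minOperations nums queries)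

-- ===== LEMMAS AND PROOFS =====

theorem pvAccAux_getD (s : List Int) (a : Int) (k : Nat) (hk : k < s.length) :
    (pvAccAux a s).getD k 0 = a + (s.take (k+1)).sum := by
  induction s generalizing a k with
  | nil => simp at hk
  | cons x xs ih =>
    cases k with
    | zero => simp [pvAccAux]
    | succ k =>
      simp only [pvAccAux, List.getD_cons_succ, List.take_succ_cons, List.sum_cons]
      rw [ih (a + x) k (by simpa using hk)]
      ring

theorem preSums_getD (s : List Int) (k : Nat) (hk : k ≤ s.length) :
    (0 :: pvAccAux 0 s).getD k 0 = (s.take k).sum := by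
  cases k with
  | zero => simp
  | succ k =>
    simp only [List.getD_cons_succ]
    rw [pvAccAux_getD s 0 k (by omega)]
    simp

theorem pvAccAux_last (s : List Int) (a : Int) :
    (a :: pvAccAux a s).getLast (by simp) = a + s.sum := by
  induction s generalizing a with
  | nil => simp [pvAccAux]
  | cons x xs ih =>
    simp only [pvAccAux, List.sum_cons]
    rw [List.getLast_cons (by simp), ih (a + x)]
    ring

theorem sum_abs_of_le (l : List Int) (q : Int) (h : ∀ x ∈ l, x ≤ q) :
    (l.map (fun x => |x - q|)).sum = q * l.length - l.sum := by
  induction l with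
  | nil => simp
  | cons x xs ih =>
    have hx : x ≤ q := h x (by simp)
    simp only [List.map_cons, List.sum_cons, List.length_cons]
    rw [ih (fun y hy => h y (by simp [hy])), abs_of_nonpos (by omega)]
    push_cast; ring

theorem sum_abs_of_gt (l : List Int) (q : Int) (h : ∀ x ∈ l, q < x) :
    (l.map (fun x => |x - q|)).sum = l.sum - q * l.length := by
  induction l with
  | nil => simp
  | cons x xs ih =>
    have hx : q < x := h x (by simp)
    simp only [List.map_cons, List.sum_cons, List.length_cons]
    rw [ih (fun y hy => h y (by simp [hy])), abs_of_nonneg (by omega)]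
    push_cast; ring

-- the per-query value of A, computed on the sorted list, is the sum of absolute differences
theorem perQuery (s : List Int) (q : Int) (hs : s.Pairwise (· ≤ ·)) :
    q * (PySem.List.bisectRight s q : Int) - (s.take (PySem.List.bisectRight s q)).sum
      + (s.sum - (s.take (PySem.List.bisectRight s q)).sum
         - q * ((s.length : Int) - (PySem.List.bisectRight s q : Int)))
      = (s.map (fun x => |x - q|)).sum := by
  obtain ⟨hle, hlo, hhi⟩ := PySem.List.bisectRight_spec s q hs
  set k := PySem.List.bisectRight s q with hk
  have htake : ∀ x ∈ s.take k, x ≤ q := by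
    intro x hx
    obtain ⟨j, hj, rfl⟩ := List.mem_iff_getElem.mp hx
    have hj' : j < k ∧ j < s.length := by simpa [List.length_take] using hj
    have := hlo j hj'.2 hj'.1
    simpa [List.getElem_take] using this
  have hdrop : ∀ x ∈ s.drop k, q < x := by
    intro x hx
    obtain ⟨j, hj, rfl⟩ := List.mem_iff_getElem.mp hx
    have hj' : j < s.length - k := by simpa [List.length_drop] using hj
    have hjs : k + j < s.length := by omega
    have := hhi (k + j) hjs (by omega)
    simpa [List.getElem_drop] using this
  have hsplit : s.map (fun x => |x - q|) = (s.take k).map (fun x => |x - q|) ++ (s.drop k).map (fun x => |x - q|) := by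
    rw [← List.map_append, List.take_append_drop]
  have hlt : (s.take k).length = k := by simp [List.length_take]; omega
  have hld : (s.drop k).length = s.length - k := by simp
  have hsum : (s.drop k).sum = s.sum - (s.take k).sum := by
    have := List.take_append_drop k s
    have h2 : (s.take k).sum + (s.drop k).sum = s.sum := by
      rw [← List.sum_append, this]
    omega
  rw [hsplit, List.sum_append, sum_abs_of_le _ _ htake, sum_abs_of_gt _ _ hdrop, hlt, hld, hsum]
  have : ((s.length - k : Nat) : Int) = (s.length : Int) - (k : Int) := by
    push_cast [hle]; omega
  rw [this]

-- ===== VERDICT (by name: the statement is the Claim_ definition above) =====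
theorem minOperations_spec : Claim_equal_minOperations := by
  intro nums queries _
  unfold Spec_minOperations minOperations minOperations_alt
  simp only []
  set s := PySem.List.sorted nums (fun x => x) false with hsdef
  have hsp : s.Pairwise (· ≤ ·) := PySem.List.sorted_pairwise nums (fun x => x)
  have hperm : s.Perm nums := PySem.List.sorted_perm nums (fun x => x) false
  rw [PySem.List.foldl_append_singleton_eq_map, List.nil_append]
  apply List.map_congr_left
  intro q hq
  obtain ⟨hle, -, -⟩ := PySem.List.bisectRight_spec s q hsp
  have hidx : PySem.List.pyGetD (0 :: pvAccAux 0 s) ((PySem.List.bisectRight s q : Nat) : Int) 0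
      = (s.take (PySem.List.bisectRight s q)).sum := by
    rw [PySem.List.pyGetD_natCast]
    exact preSums_getD s _ hle
  have hlast : PySem.List.pyGetD (0 :: pvAccAux 0 s) (-1) 0 = s.sum := by
    rw [PySem.List.pyGetD_neg_one (0 :: pvAccAux 0 s) 0 (by simp), pvAccAux_last]
    simp
  rw [hidx, hlast]
  have hmap : (nums.map (fun x => |x - q|)).sum = (s.map (fun x => |x - q|)).sum :=
    ((hperm.map (fun x => |x - q|)).sum_eq).symm
  rw [hmap, ← perQuery s q hsp]
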